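-- pv_equiv track=rewrite | github.com/NikitaShubin/dl_utils | utils.py | _filter_edges_by_longest_paths
-- ===== SOURCE A (Python) =====
-- from collections import defaultdict, deque
--
-- def _filter_edges_by_longest_paths(edges):
--     """
--     Обрабатывает рёбра одного типа, оставляя только те, что принадлежат
--     максимальным путям.
--
--     Новая логика:
--         - Удаляет короткие пути при наличии более длинных альтернативных
--           путей между теми же узлами
--         - Сохраняет независимые пути максимальной длины
--         - Ребро удаляется, если существует более длинный путь между его
--           началом и концом
--
--     Параметры:
--         edges (list): Список рёбер вида [(source, target)]
--
--     Возвращает: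
--         set: Множество рёбер, принадлежащих максимальным путям
--     """
--
--     # Строим граф и определяем все узлы
--     graph = defaultdict(list)
--     all_nodes = set()
--     for u, v in edges:
--         graph[u].append(v)
--         all_nodes.add(u)
--         all_nodes.add(v)
--
--     # Вычисляем максимальную длину пути между всеми парами узлов
--     max_path_lengths = {}
--     for node in sorted(all_nodes):  # Стабильный порядок
--         queue = deque([(node, 0)])  # (current_node, path_length)
--         visited = {node: 0}  # node: max_path_length
--
--         while queue:
--             current, length = queue.popleft()
--             for neighbor in graph.get(current, []):
--                 new_length = length + 1
--                 # Обновляем только если нашли более длинный путь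
--                 if neighbor not in visited or new_length > visited[neighbor]:
--                     visited[neighbor] = new_length
--                     queue.append((neighbor, new_length))
--
--         # Сохраняем результаты для стартового узла
--         for target, path_len in visited.items():
--             if node != target:  # Исключаем петли
--                 max_path_lengths[(node, target)] = path_len
--
--     # Фильтруем рёбра: оставляем только те, которые являются частью максимального пути
--     kept_edges = set()
--     for (u, v) in edges:
--         # Проверяем, является ли это ребро частью максимального пути
--         if (u, v) in max_path_lengths:
--             current_length = 1  # Длина прямого ребра
--             max_length = max_path_lengths[(u, v)]
--
--             # Если существует более длинный путь между u и v, удаляем прямое ребро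
--             if max_length > current_length:
--                 continue
--             kept_edges.add((u, v))
--         else:
--             # Если нет другого пути, сохраняем ребро
--             kept_edges.add((u, v))
--
--     return kept_edges
-- ===== SOURCE B (Python) =====
-- def _filter_edges_by_longest_paths(edges):
--     # Build successor lists; keys = all nodes in first-appearance order.
--     succ = {}
--     for u, v in edges:
--         succ.setdefault(u, []).append(v)
--         succ.setdefault(v, [])
--     # Reachability closure: after r rounds reach[x] holds every node reachable
--     # from x in at most r steps; stop at the fixpoint (at most len(succ) rounds
--     # are ever needed, since simple paths have fewer than len(succ) edges).
--     reach = {x: {x} for x in succ}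
--     for _ in range(len(succ)):
--         new = {x: set.union(reach[x], *(reach[y] for y in succ[x]))
--                for x in succ}
--         if new == reach:
--             break
--         reach = new
--     # Keep (u, v) unless some path u -> w -> ... -> v of length >= 2 exists.
--     kept = set()
--     for u, v in edges:
--         if all(w == v or v not in reach[w] for w in succ[u]):
--             kept.add((u, v))
--     return kept
-- ===== Notes on version B (the rewrite author's own statement) =====
-- stated objective: alternative
-- what changed: A computes all-pairs longest-path lengths by a per-source BFS relaxation over a queue and drops an edge when the stored length exceeds 1; B instead computes one reachability closure (iterated to its fixpoint) and keeps an edge (u,v) exactly when no successor w of u other than v can reach v, i.e. when no path of length >= 2 joins u to v.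
-- outside the precondition, e.g. on _filter_edges_by_longest_paths([(1, 2), (2, 1)]): A does not finish within the time limit, B returns {(1, 2), (2, 1)}
import Mathlib
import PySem

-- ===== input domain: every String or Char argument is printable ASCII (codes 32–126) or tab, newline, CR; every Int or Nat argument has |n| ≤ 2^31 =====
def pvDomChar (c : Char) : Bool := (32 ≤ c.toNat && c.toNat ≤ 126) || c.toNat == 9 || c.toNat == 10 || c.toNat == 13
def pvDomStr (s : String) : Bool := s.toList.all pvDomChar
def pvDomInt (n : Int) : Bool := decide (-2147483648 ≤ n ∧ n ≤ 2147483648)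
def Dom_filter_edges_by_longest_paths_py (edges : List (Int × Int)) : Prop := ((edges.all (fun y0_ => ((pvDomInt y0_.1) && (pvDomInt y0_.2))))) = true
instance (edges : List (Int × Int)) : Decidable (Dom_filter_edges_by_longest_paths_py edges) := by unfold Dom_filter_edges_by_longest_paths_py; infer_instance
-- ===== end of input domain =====

-- B replaces A's per-source longest-path BFS relaxation by one reachability
-- fixpoint closure plus a "path of length ≥ 2" test per edge (alternative
-- algorithm, similar measured cost). Both return A's value on every acyclic
-- input; A never returns on cyclic inputs (its BFS relaxation loops forever),
-- which is what Pre_ excludes.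


-- B replaces A's per-source longest-path BFS relaxation by a single reachability
-- fixpoint closure plus a "path of length >= 2" test per edge (an alternative
-- algorithm of comparable measured cost). A's BFS relaxation never terminates on a
-- cyclic graph (the Python loops forever), which is exactly what Pre_ excludes.

-- ===== PORT A =====

def pyA_bfs (graph : PySem.Dict Int (List Int)) : Nat → List (Int × Int) → PySem.Dict Int Int → PySem.Dict Int Int
  | 0, _, visited => visited
  | _ + 1, [], visited => visited
  | fuel + 1, (current, length) :: queue, visited =>
      let st := (graph.getD current []).foldl (fun (st : List (Int × Int) × PySem.Dict Int Int) neighbor =>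
        let newLength := length + 1
        match st.2.get? neighbor with
        | none => (st.1 ++ [(neighbor, newLength)], st.2.insert neighbor newLength)
        | some old => if old < newLength then (st.1 ++ [(neighbor, newLength)], st.2.insert neighbor newLength) else st)
        (queue, visited)
      pyA_bfs graph fuel st.1 st.2


def filter_edges_by_longest_paths_py (edges : List (Int × Int)) : List (Int × Int) :=
  let st := edges.foldl (fun (st : PySem.Dict Int (List Int) × PySem.Set Int) e =>
      (st.1.modify e.1 [] (· ++ [e.2]), PySem.Set.add (PySem.Set.add st.2 e.1) e.2))
    (PySem.Dict.empty, PySem.Set.empty)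
  let graph := st.1
  let allNodes := st.2
  let nodesSorted := PySem.List.sorted allNodes (fun x => x) false
  let fuel := (nodesSorted.length + 2) ^ 3
  let mpl := nodesSorted.foldl (fun (mpl : PySem.Dict (Int × Int) Int) node =>
      let visited := pyA_bfs graph fuel [(node, 0)] (PySem.Dict.empty.insert node 0)
      visited.items.foldl (fun mpl p =>
        if node ≠ p.1 then mpl.insert (node, p.1) p.2 else mpl) mpl)
    PySem.Dict.empty
  edges.foldl (fun kept e =>
      match mpl.get? e with
      | some maxLength => if maxLength > 1 then kept else PySem.Set.add kept e
      | none => PySem.Set.add kept e)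
    PySem.Set.empty


-- ===== PORT B =====

def pyB_succ (edges : List (Int × Int)) : PySem.Dict Int (List Int) :=
  edges.foldl (fun d e => (d.modify e.1 [] (· ++ [e.2])).setdefault e.2 []) PySem.Dict.empty


def pyB_round (succ : PySem.Dict Int (List Int)) (reach : PySem.Dict Int (PySem.Set Int)) :
    PySem.Dict Int (PySem.Set Int) :=
  succ.keys.foldl (fun r x =>
    r.insert x ((succ.getD x []).foldl (fun s y => PySem.Set.union s (reach.getD y PySem.Set.empty))
      (reach.getD x PySem.Set.empty))) PySem.Dict.empty


def pyB_dictEq (d1 d2 : PySem.Dict Int (PySem.Set Int)) : Bool :=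
  PySem.Set.equal d1.keys d2.keys &&
    d1.keys.all (fun k => PySem.Set.equal (d1.getD k PySem.Set.empty) (d2.getD k PySem.Set.empty))


def pyB_reach (succ : PySem.Dict Int (List Int)) : PySem.Dict Int (PySem.Set Int) :=
  let r0 := succ.keys.foldl (fun r x => r.insert x (PySem.Set.ofList [x])) PySem.Dict.empty
  (((List.range succ.size).foldl (fun (st : PySem.Dict Int (PySem.Set Int) × Bool) _ =>
      if st.2 then st
      else
        let new := pyB_round succ st.1
        if pyB_dictEq new st.1 then (st.1, true) else (new, false))
    (r0, false))).1


def filter_edges_by_longest_paths_py_alt (edges : List (Int × Int)) : List (Int × Int) :=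
  let succ := pyB_succ edges
  let reach := pyB_reach succ
  edges.foldl (fun kept e =>
      if (succ.getD e.1 []).all (fun w => w == e.2 || !(PySem.Set.contains (reach.getD w PySem.Set.empty) e.2))
      then PySem.Set.add kept e else kept)
    PySem.Set.empty


-- ===== PRECONDITION & SPEC =====
-- successors of x, in edge-list order

def pvSucc (edges : List (Int × Int)) (x : Int) : List Int :=
  (edges.filter (fun p => p.1 == x)).map (·.2)


def pvGrow (edges : List (Int × Int)) (S : List Int) : List Int :=
  (S ++ S.flatMap (pvSucc edges)).dedup


-- every node reachable from s in at most 2*len(edges) steps (enough to see any cycle)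

def pvReach (edges : List (Int × Int)) (s : Int) : List Int :=
  (List.range (2 * edges.length)).foldl (fun S _ => pvGrow edges S) [s]


-- Pre_ admits exactly the edge lists whose graph is acyclic: on a cyclic graph A's
-- BFS relaxation increases path lengths forever and the Python never returns.

def Pre_filter_edges_by_longest_paths_py (edges : List (Int × Int)) : Prop :=
  ∀ e ∈ edges, e.1 ∉ pvReach edges e.2

instance (edges : List (Int × Int)) : Decidable (Pre_filter_edges_by_longest_paths_py edges) := by
  unfold Pre_filter_edges_by_longest_paths_py; infer_instance

def pvWitness_filter_edges_by_longest_paths_py : (List (Int × Int)) := [(1, 2), (2, 3), (1, 3), (5, 6)]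

def Spec_filter_edges_by_longest_paths_py (edges : List (Int × Int)) (out : List (Int × Int)) : Prop :=
  out = filter_edges_by_longest_paths_py_alt edges
instance (edges : List (Int × Int)) (out : List (Int × Int)) : Decidable (Spec_filter_edges_by_longest_paths_py edges out) := by
  unfold Spec_filter_edges_by_longest_paths_py; infer_instance

-- ===== CLAIM (what is proved, stated in full; the proofs are below) =====
def Claim_equal_filter_edges_by_longest_paths_py : Prop :=
  ∀ (edges : List (Int × Int)), Dom_filter_edges_by_longest_paths_py edges →
    Pre_filter_edges_by_longest_paths_py edges →
    Spec_filter_edges_by_longest_paths_py edges (filter_edges_by_longest_paths_py edges)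

-- ===== LEMMAS AND PROOFS =====

inductive PvPath (E : List (Int × Int)) : Int → Int → Nat → Prop
  | refl (u : Int) : PvPath E u u 0
  | cons {u w v : Int} {k : Nat} : (u, w) ∈ E → PvPath E w v k → PvPath E u v (k + 1)


def pvNodes (edges : List (Int × Int)) : List Int :=
  edges.foldl (fun s e => PySem.Set.add (PySem.Set.add s e.1) e.2) PySem.Set.empty


def pvAcyclic (E : List (Int × Int)) : Prop := ∀ n k, ¬ PvPath E n n (k + 1)


lemma mem_pvSucc (E : List (Int × Int)) (x y : Int) : y ∈ pvSucc E x ↔ (x, y) ∈ E := by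
  simp only [pvSucc, List.mem_map, List.mem_filter, beq_iff_eq]
  constructor
  · rintro ⟨⟨a, b⟩, ⟨hm, rfl⟩, rfl⟩; exact hm
  · intro h; exact ⟨(x, y), ⟨h, rfl⟩, rfl⟩


lemma pvPath_zero {E : List (Int × Int)} {u v : Int} (h : PvPath E u v 0) : u = v := by
  cases h; rfl


lemma PvPath.snoc {E : List (Int × Int)} {u y v : Int} {k : Nat}
    (h : PvPath E u y k) (he : (y, v) ∈ E) : PvPath E u v (k + 1) := by
  induction h with
  | refl => exact PvPath.cons he (PvPath.refl v)
  | cons h1 _ ih => exact PvPath.cons h1 (ih he)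


lemma pvPath_succ_iff {E : List (Int × Int)} {u v : Int} {k : Nat} :
    PvPath E u v (k + 1) ↔ ∃ w, (u, w) ∈ E ∧ PvPath E w v k := by
  constructor
  · intro h; cases h with
    | cons h1 h2 => exact ⟨_, h1, h2⟩
  · rintro ⟨w, h1, h2⟩; exact PvPath.cons h1 h2


lemma pvPath_snoc_elim {E : List (Int × Int)} {u v : Int} {k : Nat}
    (h : PvPath E u v (k + 1)) : ∃ y, PvPath E u y k ∧ (y, v) ∈ E := by
  induction k generalizing u with
  | zero =>
    obtain ⟨w, h1, h2⟩ := pvPath_succ_iff.mp h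
    obtain rfl := pvPath_zero h2
    exact ⟨u, PvPath.refl u, h1⟩
  | succ j ih =>
    obtain ⟨w, h1, h2⟩ := pvPath_succ_iff.mp h
    obtain ⟨y, hy1, hy2⟩ := ih h2
    exact ⟨y, PvPath.cons h1 hy1, hy2⟩


def PvWalk (E : List (Int × Int)) (l : List Int) : Prop := List.IsChain (fun a b => (a, b) ∈ E) l


lemma pvWalk_to_path {E : List (Int × Int)} :
    ∀ (l : List Int) (u : Int), PvWalk E (u :: l) →
      PvPath E u ((u :: l).getLast (by simp)) l.length := by
  intro l
  induction l with
  | nil => intro u _; simpa using PvPath.refl u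
  | cons b t ih =>
    intro u h
    rw [PvWalk, List.isChain_cons_cons] at h
    have := ih b h.2
    have hlast : (u :: b :: t).getLast (by simp) = (b :: t).getLast (by simp) := by
      rw [List.getLast_cons (by simp)]
    rw [hlast]
    exact PvPath.cons h.1 this


lemma pvPath_to_walk {E : List (Int × Int)} {u v : Int} {k : Nat} (h : PvPath E u v k) :
    ∃ l, PvWalk E (u :: l) ∧ (u :: l).getLast (by simp) = v ∧ l.length = k := by
  induction h with
  | refl w => exact ⟨[], by simp [PvWalk], by simp, rfl⟩
  | @cons u' w' v' k' h1 _ ih =>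
    obtain ⟨l, hw, hlast, hlen⟩ := ih
    refine ⟨w' :: l, ?_, ?_, by simp [hlen]⟩
    · rw [PvWalk, List.isChain_cons_cons]; exact ⟨h1, hw⟩
    · rw [List.getLast_cons (by simp)]; exact hlast


lemma nodup_pvNodes (edges : List (Int × Int)) : (pvNodes edges).Nodup := by
  rw [pvNodes]
  generalize hs : PySem.Set.empty = s
  have : (s : List Int).Nodup := by rw [← hs]; simp [PySem.Set.empty]
  clear hs
  induction edges generalizing s with
  | nil => simpa using this
  | cons e t ih => exact ih _ (PySem.Set.nodup_add _ _ (PySem.Set.nodup_add _ _ this))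


lemma mem_pvNodes_aux {x : Int} : ∀ (edges : List (Int × Int)) (s : List Int),
    x ∈ edges.foldl (fun s e => PySem.Set.add (PySem.Set.add s e.1) e.2) s
      ↔ x ∈ s ∨ ∃ e ∈ edges, x = e.1 ∨ x = e.2 := by
  intro edges
  induction edges with
  | nil => simp
  | cons e t ih =>
    intro s
    simp only [List.foldl_cons, ih, PySem.Set.mem_add, List.mem_cons]
    constructor
    · rintro (((h | h) | h) | ⟨e', he', h⟩)
      · exact Or.inl h
      · exact Or.inr ⟨e, Or.inl rfl, Or.inl h⟩
      · exact Or.inr ⟨e, Or.inl rfl, Or.inr h⟩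
      · exact Or.inr ⟨e', Or.inr he', h⟩
    · rintro (h | ⟨e', (rfl | he'), h⟩)
      · exact Or.inl (Or.inl (Or.inl h))
      · rcases h with h | h
        · exact Or.inl (Or.inl (Or.inr h))
        · exact Or.inl (Or.inr h)
      · exact Or.inr ⟨e', he', h⟩


lemma mem_pvNodes {edges : List (Int × Int)} {x : Int} :
    x ∈ pvNodes edges ↔ ∃ e ∈ edges, x = e.1 ∨ x = e.2 := by
  rw [pvNodes]
  rw [mem_pvNodes_aux]
  simp [PySem.Set.empty]


lemma length_pvNodes_le_aux : ∀ (edges : List (Int × Int)) (s : List Int),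
    (edges.foldl (fun s e => PySem.Set.add (PySem.Set.add s e.1) e.2) s).length
      ≤ s.length + 2 * edges.length := by
  intro edges
  induction edges with
  | nil => simp
  | cons e t ih =>
    intro s
    have h1 : (PySem.Set.add (PySem.Set.add s e.1) e.2).length ≤ s.length + 2 := by
      have a1 : (PySem.Set.add s e.1).length ≤ s.length + 1 := by
        rw [PySem.Set.add_eq_ite]; split <;> simp
      have a2 : (PySem.Set.add (PySem.Set.add s e.1) e.2).length ≤ (PySem.Set.add s e.1).length + 1 := by
        rw [PySem.Set.add_eq_ite]; split <;> simp
      omega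
    have h2 := ih (PySem.Set.add (PySem.Set.add s e.1) e.2)
    simp only [List.foldl_cons, List.length_cons]
    omega


lemma length_pvNodes_le (edges : List (Int × Int)) :
    (pvNodes edges).length ≤ 2 * edges.length := by
  have := length_pvNodes_le_aux edges PySem.Set.empty
  simpa [PySem.Set.empty] using this


lemma pvWalk_mem_nodes {E : List (Int × Int)} :
    ∀ (l : List Int), PvWalk E l → 2 ≤ l.length → ∀ x ∈ l, x ∈ pvNodes E := by
  intro l
  induction l with
  | nil => simp
  | cons a t ih =>
    intro hw hlen x hx
    match t, hx with
    | b :: t', hx =>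
      rw [PvWalk, List.isChain_cons_cons] at hw
      have hab : (a, b) ∈ E := hw.1
      rcases List.mem_cons.mp hx with rfl | hx'
      · exact mem_pvNodes.mpr ⟨(x, b), hab, Or.inl rfl⟩
      · rcases t' with _ | ⟨c, t''⟩
        · obtain rfl : x = b := by simpa using hx'
          exact mem_pvNodes.mpr ⟨(a, x), hab, Or.inr rfl⟩
        · exact ih hw.2 (by simp) x hx'


lemma exists_dup_of_not_nodup : ∀ {l : List Int}, ¬ l.Nodup →
    ∃ x l1 l2 l3, l = l1 ++ x :: l2 ++ x :: l3 := by
  intro l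
  induction l with
  | nil => intro h; exact absurd List.nodup_nil h
  | cons a t ih =>
    intro h
    by_cases ha : a ∈ t
    · obtain ⟨s, t', rfl⟩ := List.mem_iff_append.mp ha
      exact ⟨a, [], s, t', by simp⟩
    · have : ¬ t.Nodup := fun hn => h (List.nodup_cons.mpr ⟨ha, hn⟩)
      obtain ⟨x, l1, l2, l3, rfl⟩ := ih this
      exact ⟨x, a :: l1, l2, l3, by simp⟩


lemma cycle_of_dup {E : List (Int × Int)} {x : Int} {l1 l2 l3 : List Int}
    (h : PvWalk E (l1 ++ x :: l2 ++ x :: l3)) : PvPath E x x (l2.length + 1) := by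
  have h1 : PvWalk E (x :: l2 ++ x :: l3) := by
    have := (List.isChain_append.mp (by simpa using h)).2.1
    simpa [PvWalk] using this
  have h2 : PvWalk E ((x :: l2) ++ [x]) := by
    rw [PvWalk, List.isChain_append]
    have hsplit := List.isChain_append.mp
      (show List.IsChain (fun a b => (a, b) ∈ E) ((x :: l2) ++ (x :: l3)) by simpa [PvWalk] using h1)
    refine ⟨hsplit.1, by simp [List.IsChain], ?_⟩
    intro a ha y hy
    simp only [List.head?_cons, Option.mem_some_iff] at hy
    subst hy
    have := hsplit.2.2 a ha x
    apply this
    rcases l3 with _ | ⟨c, t⟩ <;> simp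
  have := pvWalk_to_path (l2 ++ [x]) x (by simpa using h2)
  have hlast : ((x :: (l2 ++ [x])).getLast (by simp)) = x := by
    simp [List.getLast_append]
  rw [hlast] at this
  simpa using this


lemma pvPath_bound {E : List (Int × Int)} (hac : pvAcyclic E) {u v : Int} {k : Nat}
    (h : PvPath E u v k) : k = 0 ∨ k + 1 ≤ (pvNodes E).length := by
  rcases Nat.eq_zero_or_pos k with rfl | hk
  · exact Or.inl rfl
  obtain ⟨l, hw, hlast, hlen⟩ := pvPath_to_walk h
  by_cases hnd : (u :: l).Nodup
  · right
    have hsub : (u :: l) ⊆ pvNodes E :=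
      fun x hx => pvWalk_mem_nodes _ hw (by simp; omega) x hx
    have := (List.subperm_of_subset hnd hsub).length_le
    simpa [hlen] using this
  · obtain ⟨x, l1, l2, l3, heq⟩ := exists_dup_of_not_nodup hnd
    rw [heq] at hw
    exact absurd (cycle_of_dup hw) (hac x l2.length)


lemma pvPath_shrink {E : List (Int × Int)} {u v : Int} :
    ∀ (k : Nat), PvPath E u v k → ∃ k', (k' = 0 ∨ k' + 1 ≤ (pvNodes E).length) ∧ PvPath E u v k' := by
  intro k
  induction k using Nat.strong_induction_on with
  | _ k ih =>
    intro h
    rcases Nat.eq_zero_or_pos k with rfl | hk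
    · exact ⟨0, Or.inl rfl, h⟩
    obtain ⟨l, hw, hlast, hlen⟩ := pvPath_to_walk h
    by_cases hnd : (u :: l).Nodup
    · refine ⟨k, Or.inr ?_, h⟩
      have hsub : (u :: l) ⊆ pvNodes E :=
        fun x hx => pvWalk_mem_nodes _ hw (by simp; omega) x hx
      have := (List.subperm_of_subset hnd hsub).length_le
      simpa [hlen] using this
    · obtain ⟨x, l1, l2, l3, heq⟩ := exists_dup_of_not_nodup hnd
      -- cut the loop out: l1 ++ x :: l3 is a shorter walk from u to v
      have hw' : PvWalk E (l1 ++ x :: l3) := by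
        rw [heq] at hw
        rw [PvWalk, List.isChain_append]
        have hsplit := List.isChain_append.mp (by simpa using hw)
        have h2 : PvWalk E (x :: l2 ++ x :: l3) := by simpa [PvWalk] using hsplit.2.1
        have h3 : List.IsChain (fun a b => (a, b) ∈ E) (x :: l3) := by
          have := (List.isChain_append.mp
            (show List.IsChain (fun a b => (a, b) ∈ E) ((x :: l2) ++ (x :: l3)) by
              simpa [PvWalk] using h2)).2.1
          simpa using this
        refine ⟨hsplit.1, h3, ?_⟩
        intro a ha y hy
        simp only [List.head?_cons, Option.mem_some_iff] at hy
        subst hy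
        exact hsplit.2.2 a ha x (by simp)
      -- it still goes from u to v
      have hne : (l1 ++ x :: l3) ≠ [] := by simp
      obtain ⟨u', l', hul⟩ : ∃ u' l', l1 ++ x :: l3 = u' :: l' :=
        ⟨_, _, (List.cons_head_tail hne).symm⟩
      have hu : u' = u := by
        have h0 : (u :: l).head? = some u := rfl
        rw [heq] at h0
        have h1 : (u' :: l').head? = some u' := rfl
        rw [← hul] at h1
        rcases l1 with _ | ⟨a, t⟩
        · simp only [List.nil_append, List.head?_cons] at h0 h1
          rw [← Option.some_inj.mp h1, Option.some_inj.mp h0]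
        · simp only [List.cons_append, List.head?_cons] at h0 h1
          rw [← Option.some_inj.mp h1, Option.some_inj.mp h0]
      have hv : (u' :: l').getLast (by simp) = v := by
        have h0 : (u :: l).getLast? = some v :=
          (List.getLast_eq_iff_getLast?_eq_some (by simp)).mp hlast
        rw [heq] at h0
        have e1 : l1 ++ x :: l2 ++ x :: l3 = (l1 ++ x :: l2) ++ (x :: l3) := by simp
        rw [e1, List.getLast?_append_of_ne_nil _ (by simp)] at h0
        have h1 : (l1 ++ x :: l3).getLast? = some v := by
          rw [List.getLast?_append_of_ne_nil _ (by simp)]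
          exact h0
        rw [hul] at h1
        exact (List.getLast_eq_iff_getLast?_eq_some (by simp)).mpr h1
      have hpath' : PvPath E u v l'.length := by
        have := pvWalk_to_path l' u' (hul ▸ hw')
        rw [hv] at this; rwa [hu] at this
      have hshort : l'.length < k := by
        have hk1 : (u :: l).length = k + 1 := by simp [hlen]
        have : (u' :: l').length < (u :: l).length := by
          rw [← hul, heq]; simp
        simp only [List.length_cons] at this hk1
        omega
      exact ih l'.length hshort hpath'


lemma foldl_range_const {α : Type} (g : α → α) (r : Nat) (a : α) :
    (List.range r).foldl (fun S _ => g S) a = g^[r] a := by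
  induction r with
  | zero => rfl
  | succ n ih => rw [List.range_succ, List.foldl_append, ih, Function.iterate_succ_apply']; rfl


lemma mem_pvGrow {E : List (Int × Int)} {S : List Int} {v : Int} :
    v ∈ pvGrow E S ↔ v ∈ S ∨ ∃ x ∈ S, (x, v) ∈ E := by
  simp [pvGrow, mem_pvSucc]


lemma mem_iterate_grow {E : List (Int × Int)} {s v : Int} :
    ∀ (r : Nat), v ∈ (pvGrow E)^[r] [s] ↔ ∃ k ≤ r, PvPath E s v k := by
  intro r
  induction r generalizing v with
  | zero =>
    simp only [Function.iterate_zero, id, List.mem_singleton]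
    constructor
    · rintro rfl; exact ⟨0, Nat.le_refl 0, PvPath.refl _⟩
    · rintro ⟨k, hk, hp⟩
      obtain rfl : k = 0 := Nat.le_zero.mp hk
      exact (pvPath_zero hp).symm
  | succ r ih =>
    rw [Function.iterate_succ_apply', mem_pvGrow]
    constructor
    · rintro (h | ⟨x, hx, he⟩)
      · obtain ⟨k, hk, hp⟩ := ih.mp h
        exact ⟨k, Nat.le_succ_of_le hk, hp⟩
      · obtain ⟨k, hk, hp⟩ := (ih (v := x)).mp hx
        exact ⟨k + 1, Nat.succ_le_succ hk, hp.snoc he⟩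
    · rintro ⟨k, hk, hp⟩
      rcases Nat.lt_or_ge k (r + 1) with hlt | hge
      · exact Or.inl (ih.mpr ⟨k, Nat.lt_succ_iff.mp hlt, hp⟩)
      · obtain rfl : k = r + 1 := Nat.le_antisymm hk hge
        obtain ⟨y, hy1, hy2⟩ := pvPath_snoc_elim hp
        exact Or.inr ⟨y, ih.mpr ⟨r, Nat.le_refl r, hy1⟩, hy2⟩


lemma pre_iff_acyclic (edges : List (Int × Int)) :
    Pre_filter_edges_by_longest_paths_py edges ↔ pvAcyclic edges := by
  constructor
  · intro hpre n k hp
    obtain ⟨w, hw, hp'⟩ := pvPath_succ_iff.mp hp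
    obtain ⟨k', hk', hp''⟩ := pvPath_shrink _ hp'
    have hE : 1 ≤ edges.length := by
      rcases edges with _ | ⟨e, t⟩
      · simp at hw
      · simp
    have hkle : k' ≤ 2 * edges.length := by
      rcases hk' with rfl | hb
      · omega
      · have := length_pvNodes_le edges
        omega
    have : n ∈ pvReach edges w := by
      rw [pvReach, foldl_range_const]
      exact (mem_iterate_grow _).mpr ⟨k', hkle, hp''⟩
    exact hpre (n, w) hw this
  · intro hac e he hmem
    rw [pvReach, foldl_range_const] at hmem
    obtain ⟨k, _, hp⟩ := (mem_iterate_grow _).mp hmem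
    exact hac e.1 k (PvPath.cons (by simpa using he) hp)

-- ===== adjacency dictionaries =====


lemma graphA_getD (edges : List (Int × Int)) (x : Int) :
    (edges.foldl (fun (d : PySem.Dict Int (List Int)) e => d.modify e.1 [] (· ++ [e.2])) PySem.Dict.empty).getD x []
      = pvSucc edges x := by
  rw [PySem.Dict.getD_foldl_modify_append]
  simp [pvSucc, PySem.Dict.getD_empty]


lemma stepB_getD (d : PySem.Dict Int (List Int)) (e : Int × Int) (x : Int) :
    ((d.modify e.1 [] (· ++ [e.2])).setdefault e.2 []).getD x []
      = if x = e.1 then d.getD x [] ++ [e.2] else d.getD x [] := by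
  by_cases hx2 : x = e.2
  · subst hx2
    rw [PySem.Dict.getD_setdefault_self, PySem.Dict.getD_modify]
    split_ifs with h
    · rw [h]
    · rfl
  · have h : ((d.modify e.1 [] (· ++ [e.2])).setdefault e.2 []).get? x
        = (d.modify e.1 [] (· ++ [e.2])).get? x := PySem.Dict.get?_setdefault_of_ne _ _ hx2
    rw [PySem.Dict.getD_eq_get?_getD, h, ← PySem.Dict.getD_eq_get?_getD,
      PySem.Dict.getD_modify]
    split_ifs with h'
    · rw [h']
    · rfl


lemma succB_getD_aux (x : Int) : ∀ (edges : List (Int × Int)) (d : PySem.Dict Int (List Int)),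
    (edges.foldl (fun d e => (d.modify e.1 [] (· ++ [e.2])).setdefault e.2 []) d).getD x []
      = d.getD x [] ++ (edges.filter (fun p => p.1 == x)).map (·.2) := by
  intro edges
  induction edges with
  | nil => simp
  | cons e t ih =>
    intro d
    rw [List.foldl_cons, ih, stepB_getD]
    by_cases hx : x = e.1
    · subst hx
      simp [List.filter_cons, beq_iff_eq]
    · have : ¬ (e.1 = x) := fun h => hx h.symm
      simp [List.filter_cons, this, hx]


lemma succB_getD (edges : List (Int × Int)) (x : Int) :
    (pyB_succ edges).getD x [] = pvSucc edges x := by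
  rw [pyB_succ, succB_getD_aux]
  simp [pvSucc, PySem.Dict.getD_empty]


lemma succB_keys_aux : ∀ (edges : List (Int × Int)) (d : PySem.Dict Int (List Int)),
    d.keys.Nodup →
    (edges.foldl (fun d e => (d.modify e.1 [] (· ++ [e.2])).setdefault e.2 []) d).keys
      = edges.foldl (fun s e => PySem.Set.add (PySem.Set.add s e.1) e.2) d.keys := by
  intro edges
  induction edges with
  | nil => simp
  | cons e t ih =>
    intro d hnd
    rw [List.foldl_cons, List.foldl_cons]
    have h1 : (d.modify e.1 [] (· ++ [e.2])).keys = PySem.Set.add d.keys e.1 := by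
      rw [PySem.Dict.keys_modify]
      by_cases hc : d.contains e.1 = true
      · rw [PySem.Dict.keys_insert_of_contains _ _ hc,
          PySem.Set.add_of_mem ((PySem.Dict.contains_iff_mem_keys _ _).mp hc)]
      · rw [PySem.Dict.keys_insert_of_not_contains _ _ (by simpa using hc),
          PySem.Set.add_of_not_mem (fun hm => hc ((PySem.Dict.contains_iff_mem_keys _ _).mpr hm))]
    have hstep : ((d.modify e.1 [] (· ++ [e.2])).setdefault e.2 []).keys
        = PySem.Set.add (PySem.Set.add d.keys e.1) e.2 := by
      rw [PySem.Dict.keys_setdefault, h1]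
      by_cases hc : (d.modify e.1 [] (· ++ [e.2])).contains e.2 = true
      · have hm : e.2 ∈ PySem.Set.add d.keys e.1 := by
          rw [← h1]; exact (PySem.Dict.contains_iff_mem_keys _ _).mp hc
        rw [if_pos hc]
        exact (PySem.Set.add_of_mem hm).symm
      · have hm : e.2 ∉ PySem.Set.add d.keys e.1 := fun hm =>
          hc ((PySem.Dict.contains_iff_mem_keys _ _).mpr (by rw [h1]; exact hm))
        rw [if_neg hc]
        exact (PySem.Set.add_of_not_mem hm).symm
    rw [← hstep]
    apply ih
    rw [hstep]
    exact PySem.Set.nodup_add _ _ (PySem.Set.nodup_add _ _ hnd)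


lemma succB_keys (edges : List (Int × Int)) : (pyB_succ edges).keys = pvNodes edges := by
  rw [pyB_succ, succB_keys_aux edges PySem.Dict.empty (by simp [PySem.Dict.nodup_keys_empty])]
  rfl


lemma succB_size (edges : List (Int × Int)) : (pyB_succ edges).size = (pvNodes edges).length := by
  have : (pyB_succ edges).size = (pyB_succ edges).keys.length := by
    simp [PySem.Dict.size, PySem.Dict.keys]
  rw [this, succB_keys]

-- ===== B: reachability closure =====


def pvRInv (E : List (Int × Int)) (r : Nat) (reach : PySem.Dict Int (PySem.Set Int)) : Prop :=
  ∀ x ∈ pvNodes E, ∃ S, reach.get? x = some S ∧ ∀ v, v ∈ S ↔ ∃ k ≤ r, PvPath E x v k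


def pvRFull (E : List (Int × Int)) (reach : PySem.Dict Int (PySem.Set Int)) : Prop :=
  ∀ x ∈ pvNodes E, ∃ S, reach.get? x = some S ∧ ∀ v, v ∈ S ↔ ∃ k, PvPath E x v k


lemma get?_foldl_insert_fun {L : List Int} (hL : L.Nodup) (g : Int → PySem.Set Int) (x : Int) :
    ((L.foldl (fun (r : PySem.Dict Int (PySem.Set Int)) x => r.insert x (g x)) PySem.Dict.empty)).get? x
      = if x ∈ L then some (g x) else none := by
  have hitems := PySem.Dict.items_foldl_insert_fresh L (fun y => y) g PySem.Dict.empty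
    (by intro a _; simp [PySem.Dict.contains_empty]) (by simpa using hL)
  have hnd : ((L.foldl (fun (r : PySem.Dict Int (PySem.Set Int)) x => r.insert x (g x)) PySem.Dict.empty)).keys.Nodup :=
    PySem.Dict.nodup_keys_foldl_insert L (fun _ x => g x) _ PySem.Dict.nodup_keys_empty
  by_cases hx : x ∈ L
  · rw [if_pos hx]
    have hm : (x, g x) ∈ PySem.Dict.empty.items ++ L.map (fun a => ((fun y => y) a, g a)) :=
      List.mem_append_right _ (List.mem_map.mpr ⟨x, hx, rfl⟩)
    exact PySem.Dict.get?_of_mem_items _ (by rw [hitems]; exact hm) hnd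
  · rw [if_neg hx, PySem.Dict.get?_eq_none_iff_not_mem_keys]
    intro hmem
    rw [PySem.Dict.keys, hitems] at hmem
    simp only [List.map_append, List.mem_append, List.map_map] at hmem
    rcases hmem with hmem | hmem
    · simpa [PySem.Dict.empty] using hmem
    · simp only [List.mem_map, Function.comp] at hmem
      obtain ⟨a, ha, rfl⟩ := hmem
      exact hx ha


lemma mem_foldl_union {ns : List Int} {h : Int → PySem.Set Int} {s0 : PySem.Set Int} {v : Int} :
    v ∈ ns.foldl (fun s y => PySem.Set.union s (h y)) s0 ↔ v ∈ s0 ∨ ∃ y ∈ ns, v ∈ h y := by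
  induction ns generalizing s0 with
  | nil => simp
  | cons a t ih =>
    rw [List.foldl_cons, ih, PySem.Set.mem_union]
    constructor
    · rintro ((h1 | h1) | ⟨y, hy, h1⟩)
      · exact Or.inl h1
      · exact Or.inr ⟨a, List.mem_cons_self, h1⟩
      · exact Or.inr ⟨y, List.mem_cons_of_mem _ hy, h1⟩
    · rintro (h1 | ⟨y, hy, h1⟩)
      · exact Or.inl (Or.inl h1)
      · rcases List.mem_cons.mp hy with rfl | hy'
        · exact Or.inl (Or.inr h1)
        · exact Or.inr ⟨y, hy', h1⟩


lemma round_rinv {edges : List (Int × Int)} {r : Nat} {reach : PySem.Dict Int (PySem.Set Int)}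
    (h : pvRInv edges r reach) : pvRInv edges (r + 1) (pyB_round (pyB_succ edges) reach) := by
  intro x hx
  have hkeys := succB_keys edges
  have hnd : (pyB_succ edges).keys.Nodup := by rw [hkeys]; exact nodup_pvNodes edges
  rw [pyB_round, get?_foldl_insert_fun hnd _ x, hkeys, if_pos hx]
  refine ⟨_, rfl, ?_⟩
  intro v
  rw [mem_foldl_union]
  obtain ⟨Sx, hSx, hSx2⟩ := h x hx
  rw [PySem.Dict.getD_of_get?_eq_some _ _ hSx]
  constructor
  · rintro (hv | ⟨y, hy, hv⟩)
    · obtain ⟨k, hk, hp⟩ := hSx2 v |>.mp hv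
      exact ⟨k, Nat.le_succ_of_le hk, hp⟩
    · rw [succB_getD, mem_pvSucc] at hy
      have hyn : y ∈ pvNodes edges := mem_pvNodes.mpr ⟨(x, y), hy, Or.inr rfl⟩
      obtain ⟨Sy, hSy, hSy2⟩ := h y hyn
      rw [PySem.Dict.getD_of_get?_eq_some _ _ hSy] at hv
      obtain ⟨k, hk, hp⟩ := hSy2 v |>.mp hv
      exact ⟨k + 1, Nat.succ_le_succ hk, PvPath.cons hy hp⟩
  · rintro ⟨k, hk, hp⟩
    rcases Nat.lt_or_ge k (r + 1) with hlt | hge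
    · exact Or.inl ((hSx2 v).mpr ⟨k, Nat.lt_succ_iff.mp hlt, hp⟩)
    · obtain rfl : k = r + 1 := Nat.le_antisymm hk hge
      obtain ⟨w, hw, hp'⟩ := pvPath_succ_iff.mp hp
      have hwn : w ∈ pvNodes edges := mem_pvNodes.mpr ⟨(x, w), hw, Or.inr rfl⟩
      obtain ⟨Sw, hSw, hSw2⟩ := h w hwn
      refine Or.inr ⟨w, ?_, ?_⟩
      · rw [succB_getD, mem_pvSucc]; exact hw
      · rw [PySem.Dict.getD_of_get?_eq_some _ _ hSw]
        exact (hSw2 v).mpr ⟨r, Nat.le_refl r, hp'⟩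


lemma round_keys (edges : List (Int × Int)) (reach : PySem.Dict Int (PySem.Set Int)) :
    (pyB_round (pyB_succ edges) reach).keys = pvNodes edges := by
  have hkeys := succB_keys edges
  have hnd : (pyB_succ edges).keys.Nodup := by rw [hkeys]; exact nodup_pvNodes edges
  rw [pyB_round, PySem.Dict.keys]
  rw [PySem.Dict.items_foldl_insert_fresh _ (fun y => y) _ PySem.Dict.empty
    (by intro a _; simp [PySem.Dict.contains_empty]) (by simpa using hnd)]
  simp only [List.map_append, List.map_map]
  rw [show List.map (fun x => x.1) PySem.Dict.empty.items = ([] : List Int) from rfl]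
  rw [List.nil_append, ← hkeys]
  have : ((fun (x : Int × PySem.Set Int) => x.1) ∘ fun a =>
      (a, List.foldl (fun s y => s.union (reach.getD y PySem.Set.empty)) (reach.getD a PySem.Set.empty)
        ((pyB_succ edges).getD a [])))
      = fun a => a := rfl
  rw [this, List.map_id']


lemma fix_rfull {edges : List (Int × Int)} {r : Nat} {reach : PySem.Dict Int (PySem.Set Int)}
    (h : pvRInv edges r reach)
    (hfix : pyB_dictEq (pyB_round (pyB_succ edges) reach) reach = true) :
    pvRFull edges reach := by
  rw [pyB_dictEq, Bool.and_eq_true] at hfix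
  have hmemiff : ∀ x ∈ pvNodes edges, ∀ v,
      (v ∈ (pyB_round (pyB_succ edges) reach).getD x PySem.Set.empty
        ↔ v ∈ reach.getD x PySem.Set.empty) := by
    intro x hx v
    have := (List.all_eq_true.mp hfix.2) x (by rw [PySem.Dict.keys, ← PySem.Dict.keys, round_keys]; exact hx)
    exact (PySem.Set.equal_iff _ _).mp this v
  -- completeness at every length, by induction
  have hcomp : ∀ (k : Nat) (x v : Int), x ∈ pvNodes edges → PvPath edges x v k →
      v ∈ reach.getD x PySem.Set.empty := by
    intro k
    induction k with
    | zero =>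
      intro x v hx hp
      obtain rfl := pvPath_zero hp
      obtain ⟨S, hS, hS2⟩ := h x hx
      rw [PySem.Dict.getD_of_get?_eq_some _ _ hS]
      exact (hS2 x).mpr ⟨0, Nat.zero_le r, PvPath.refl x⟩
    | succ j ih =>
      intro x v hx hp
      obtain ⟨w, hw, hp'⟩ := pvPath_succ_iff.mp hp
      have hwn : w ∈ pvNodes edges := mem_pvNodes.mpr ⟨(x, w), hw, Or.inr rfl⟩
      have hvw : v ∈ reach.getD w PySem.Set.empty := ih w v hwn hp'
      apply (hmemiff x hx v).mp
      -- v is in the round-updated set at x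
      have hkeys := succB_keys edges
      have hnd : (pyB_succ edges).keys.Nodup := by rw [hkeys]; exact nodup_pvNodes edges
      have hget : (pyB_round (pyB_succ edges) reach).get? x ≠ none := by
        rw [pyB_round, get?_foldl_insert_fun hnd _ x, hkeys, if_pos hx]; simp
      rw [PySem.Dict.getD_eq_get?_getD, pyB_round, get?_foldl_insert_fun hnd _ x, hkeys, if_pos hx]
      simp only [Option.getD_some]
      rw [mem_foldl_union]
      refine Or.inr ⟨w, ?_, hvw⟩
      rw [succB_getD, mem_pvSucc]; exact hw
  intro x hx
  obtain ⟨S, hS, hS2⟩ := h x hx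
  refine ⟨S, hS, fun v => ?_⟩
  constructor
  · intro hv
    obtain ⟨k, _, hp⟩ := (hS2 v).mp hv
    exact ⟨k, hp⟩
  · rintro ⟨k, hp⟩
    have := hcomp k x v hx hp
    rwa [PySem.Dict.getD_of_get?_eq_some _ _ hS] at this


lemma rinv_zero (edges : List (Int × Int)) :
    pvRInv edges 0 ((pyB_succ edges).keys.foldl
      (fun (r : PySem.Dict Int (PySem.Set Int)) x => r.insert x (PySem.Set.ofList [x])) PySem.Dict.empty) := by
  intro x hx
  have hkeys := succB_keys edges
  have hnd : (pyB_succ edges).keys.Nodup := by rw [hkeys]; exact nodup_pvNodes edges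
  rw [get?_foldl_insert_fun hnd _ x, hkeys, if_pos hx]
  refine ⟨_, rfl, fun v => ?_⟩
  rw [PySem.Set.mem_ofList, List.mem_singleton]
  constructor
  · rintro rfl
    exact ⟨0, Nat.le_refl 0, PvPath.refl _⟩
  · rintro ⟨k, hk, hp⟩
    obtain rfl : k = 0 := Nat.le_zero.mp hk
    exact (pvPath_zero hp).symm


lemma reachB_full {edges : List (Int × Int)} (hac : pvAcyclic edges) :
    pvRFull edges (pyB_reach (pyB_succ edges)) := by
  rw [pyB_reach]
  set r0 := (pyB_succ edges).keys.foldl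
    (fun (r : PySem.Dict Int (PySem.Set Int)) x => r.insert x (PySem.Set.ofList [x])) PySem.Dict.empty with hr0
  set F := fun (st : PySem.Dict Int (PySem.Set Int) × Bool) (_ : Nat) =>
      if st.2 then st
      else
        let new := pyB_round (pyB_succ edges) st.1
        if pyB_dictEq new st.1 then (st.1, true) else (new, false) with hF
  -- invariant through the loop
  have main : ∀ (m : Nat) (st : PySem.Dict Int (PySem.Set Int) × Bool) (r : Nat),
      (st.2 = false → pvRInv edges r st.1) → (st.2 = true → pvRFull edges st.1) →
      (((List.range m).foldl F st).2 = false → pvRInv edges (r + m) ((List.range m).foldl F st).1) ∧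
      (((List.range m).foldl F st).2 = true → pvRFull edges ((List.range m).foldl F st).1) := by
    intro m
    induction m with
    | zero => intro st r h1 h2; simpa using ⟨h1, h2⟩
    | succ n ih =>
      intro st r h1 h2
      have hfold : (List.range (n + 1)).foldl F st = F ((List.range n).foldl F st) n := by
        rw [List.range_succ, List.foldl_append, List.foldl_cons, List.foldl_nil]
      obtain ⟨ih1, ih2⟩ := ih st r h1 h2
      rw [hfold]
      set st' := (List.range n).foldl F st with hst'
      rcases hb : st'.2 with _ | _
      · -- not done yet
        have hrinv := ih1 hb
        rw [hF]
        simp only [hb, if_false, Bool.false_eq_true]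
        by_cases hfx : pyB_dictEq (pyB_round (pyB_succ edges) st'.1) st'.1 = true
        · rw [if_pos hfx]
          exact ⟨by simp, fun _ => fix_rfull hrinv hfx⟩
        · rw [if_neg hfx]
          refine ⟨fun _ => ?_, by simp⟩
          have := round_rinv hrinv
          have harith : r + n + 1 = r + (n + 1) := by omega
          rwa [harith] at this
      · -- already done: state frozen
        have : F st' n = st' := by rw [hF]; simp [hb]
        rw [this]
        exact ⟨fun hc => absurd (hb ▸ hc) (by simp [hb]), fun _ => ih2 hb⟩
  have h0 : ((r0, false) : _ × Bool).2 = false → pvRInv edges 0 (r0, false).1 :=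
    fun _ => rinv_zero edges
  have hV := succB_size edges
  obtain ⟨hc1, hc2⟩ := main (pyB_succ edges).size (r0, false) 0 h0 (by simp)
  rcases hb : ((List.range (pyB_succ edges).size).foldl F (r0, false)).2 with _ | _
  · -- ran all |V| rounds: acyclicity bounds every path length
    have hr := hc1 hb
    intro x hx
    obtain ⟨S, hS, hS2⟩ := hr x hx
    refine ⟨S, hS, fun v => ?_⟩
    rw [hS2 v]
    constructor
    · rintro ⟨k, _, hp⟩; exact ⟨k, hp⟩
    · rintro ⟨k, hp⟩
      rcases pvPath_bound hac hp with rfl | hbd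
      · exact ⟨0, by omega, hp⟩
      · refine ⟨k, ?_, hp⟩
        rw [hV]
        omega
  · exact hc2 hb

-- ===== A: BFS relaxation =====


def pvQInv (E : List (Int × Int)) (u : Int) (q : List (Int × Int)) : Prop :=
  ∀ p ∈ q, 0 ≤ p.2 ∧ PvPath E u p.1 p.2.toNat


def pvVInv (E : List (Int × Int)) (u : Int) (vis : PySem.Dict Int Int) : Prop :=
  ∀ x c, vis.get? x = some c → 0 ≤ c ∧ PvPath E u x c.toNat


def pvWInv (E : List (Int × Int)) (q : List (Int × Int)) (vis : PySem.Dict Int Int) : Prop :=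
  ∀ x c, vis.get? x = some c →
    ((x, c) ∈ q ∨ ∀ y ∈ pvSucc E x, ∃ c', vis.get? y = some c' ∧ c + 1 ≤ c')


def pvSum (E : List (Int × Int)) (vis : PySem.Dict Int Int) : Nat :=
  ((pvNodes E).map (fun x => (pvNodes E).length - (vis.getD x 0).toNat)).sum


def pvM (E : List (Int × Int)) (q : List (Int × Int)) (vis : PySem.Dict Int Int) : Nat :=
  (pvNodes E).length * pvSum E vis + q.length


lemma sum_map_insert_lt : ∀ {ns : List Int}, ns.Nodup → ∀ {y : Int}, y ∈ ns →
    ∀ (f g : Int → Nat), (∀ x, x ≠ y → g x = f x) → g y + 1 ≤ f y →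
    (ns.map g).sum + 1 ≤ (ns.map f).sum := by
  intro ns
  induction ns with
  | nil => intro _ y hy; simp at hy
  | cons a t ih =>
    intro hnd y hy f g hoff hdec
    rw [List.map_cons, List.map_cons, List.sum_cons, List.sum_cons]
    rcases List.mem_cons.mp hy with rfl | hyt
    · have : (t.map g).sum = (t.map f).sum := by
        apply congrArg
        apply List.map_congr_left
        intro x hx
        exact hoff x (fun hxy => (List.nodup_cons.mp hnd).1 (hxy ▸ hx))
      omega
    · have ha : g a = f a := hoff a (fun hay => (List.nodup_cons.mp hnd).1 (hay ▸ hyt))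
      have := ih (List.nodup_cons.mp hnd).2 hyt f g hoff hdec
      omega


def pvStepF (l : Int) : List (Int × Int) × PySem.Dict Int Int → Int → List (Int × Int) × PySem.Dict Int Int :=
  fun st neighbor =>
    let newLength := l + 1
    match st.2.get? neighbor with
    | none => (st.1 ++ [(neighbor, newLength)], st.2.insert neighbor newLength)
    | some old => if old < newLength then (st.1 ++ [(neighbor, newLength)], st.2.insert neighbor newLength) else st


lemma bfs_fold {edges : List (Int × Int)} (hac : pvAcyclic edges) {u current : Int} {l : Int}
    (hl : 0 ≤ l) (hpath : PvPath edges u current l.toNat) :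
    ∀ (ns : List Int), (∀ y ∈ ns, (current, y) ∈ edges) →
    ∀ (q : List (Int × Int)) (vis : PySem.Dict Int Int),
      vis.keys.Nodup → pvQInv edges u q → pvVInv edges u vis →
      (vis.keys.Nodup ∧ pvQInv edges u (ns.foldl (pvStepF l) (q, vis)).1 ∧
        pvVInv edges u (ns.foldl (pvStepF l) (q, vis)).2 ∧
        (ns.foldl (pvStepF l) (q, vis)).2.keys.Nodup ∧
        (∀ x c, vis.get? x = some c → ∃ c', (ns.foldl (pvStepF l) (q, vis)).2.get? x = some c' ∧ c ≤ c') ∧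
        (∀ y ∈ ns, ∃ c, (ns.foldl (pvStepF l) (q, vis)).2.get? y = some c ∧ l + 1 ≤ c) ∧
        (∀ p ∈ q, p ∈ (ns.foldl (pvStepF l) (q, vis)).1) ∧
        (∀ x c, (ns.foldl (pvStepF l) (q, vis)).2.get? x = some c →
          vis.get? x = some c ∨ (c = l + 1 ∧ (x, c) ∈ (ns.foldl (pvStepF l) (q, vis)).1)) ∧
        (pvNodes edges).length * pvSum edges (ns.foldl (pvStepF l) (q, vis)).2
            + (ns.foldl (pvStepF l) (q, vis)).1.length ≤
          (pvNodes edges).length * pvSum edges vis + q.length) := by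
  intro ns
  induction ns with
  | nil =>
    intro _ q vis hnd hq hv
    refine ⟨hnd, hq, hv, hnd, ?_, by simp, fun p hp => hp, ?_, Nat.le_refl _⟩
    · exact fun x c h => ⟨c, h, Int.le_refl c⟩
    · exact fun x c h => Or.inl h
  | cons a t ih =>
    intro hns q vis hnd hq hv
    have hedge : (current, a) ∈ edges := hns a List.mem_cons_self
    have hnt : ∀ y ∈ t, (current, y) ∈ edges := fun y hy => hns y (List.mem_cons_of_mem _ hy)
    rw [List.foldl_cons]
    -- case on whether the step pushes
    have hpush : ∀ (hcase : vis.get? a = none ∨ ∃ old, vis.get? a = some old ∧ old < l + 1),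
        pvStepF l (q, vis) a = (q ++ [(a, l + 1)], vis.insert a (l + 1)) := by
      rintro (hcase | ⟨old, hold, hlt⟩) <;> simp only [pvStepF]
      · rw [hcase]
      · rw [hold]; simp only [if_pos hlt]
    have hskip : ∀ (old : Int), vis.get? a = some old → ¬ (old < l + 1) →
        pvStepF l (q, vis) a = (q, vis) := by
      intro old hold hnlt
      simp only [pvStepF]
      rw [hold]; simp only [if_neg hnlt]
    -- common facts for the push case
    have hcommon : ∀ (oldNat : Nat), (vis.getD a 0).toNat = oldNat → oldNat < (l + 1).toNat →
        (vis.insert a (l + 1)).keys.Nodup ∧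
        pvQInv edges u (q ++ [(a, l + 1)]) ∧
        pvVInv edges u (vis.insert a (l + 1)) ∧
        (pvNodes edges).length * pvSum edges (vis.insert a (l + 1)) + (q ++ [(a, l + 1)]).length ≤
          (pvNodes edges).length * pvSum edges vis + q.length := by
      intro oldNat holdNat hlt
      have htn : (l + 1).toNat = l.toNat + 1 := by omega
      have hpa : PvPath edges u a (l + 1).toNat := by rw [htn]; exact hpath.snoc hedge
      have han : a ∈ pvNodes edges := mem_pvNodes.mpr ⟨(current, a), hedge, Or.inr rfl⟩
      have hV1 : 1 ≤ (pvNodes edges).length := by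
        rcases hh : pvNodes edges with _ | ⟨b, t'⟩
        · rw [hh] at han; simp at han
        · simp
      have hbound : (l + 1).toNat ≤ (pvNodes edges).length := by
        rcases pvPath_bound hac hpa with h0 | hb
        · omega
        · omega
      refine ⟨PySem.Dict.nodup_keys_insert _ _ _ hnd, ?_, ?_, ?_⟩
      · intro p hp
        rcases List.mem_append.mp hp with hp | hp
        · exact hq p hp
        · obtain rfl : p = (a, l + 1) := by simpa using hp
          exact ⟨by omega, hpa⟩
      · intro x c hxc
        by_cases hx : x = a
        · subst hx
          rw [PySem.Dict.get?_insert_self] at hxc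
          obtain rfl := Option.some_inj.mp hxc
          exact ⟨by omega, hpa⟩
        · rw [PySem.Dict.get?_insert_of_ne _ _ hx] at hxc
          exact hv x c hxc
      · -- measure decreases
        have hsum : pvSum edges (vis.insert a (l + 1)) + 1 ≤ pvSum edges vis := by
          apply sum_map_insert_lt (nodup_pvNodes edges) han
          · intro x hx
            rw [PySem.Dict.getD_insert, if_neg hx]
          · rw [PySem.Dict.getD_insert, if_pos rfl, holdNat.symm] at *
            have : ((l + 1).toNat) ≤ (pvNodes edges).length := hbound
            omega
        have : (pvNodes edges).length * pvSum edges (vis.insert a (l + 1)) + (pvNodes edges).length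
            ≤ (pvNodes edges).length * pvSum edges vis := by
          calc (pvNodes edges).length * pvSum edges (vis.insert a (l + 1)) + (pvNodes edges).length
              = (pvNodes edges).length * (pvSum edges (vis.insert a (l + 1)) + 1) := by ring
            _ ≤ (pvNodes edges).length * pvSum edges vis :=
              Nat.mul_le_mul_left _ hsum
        simp only [List.length_append, List.length_cons, List.length_nil]
        omega
    rcases hva : vis.get? a with _ | old
    · -- not yet visited: push
      rw [hpush (Or.inl hva)]
      have holdNat : (vis.getD a 0).toNat = 0 := by
        rw [PySem.Dict.getD_eq_get?_getD, hva]; rfl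
      obtain ⟨k1, k2, k3, k4⟩ := hcommon 0 holdNat (by omega)
      obtain ⟨c1, c2, c3, c4, c5, c6, c7, c8, c9⟩ := ih hnt (q ++ [(a, l + 1)]) (vis.insert a (l + 1)) k1 k2 k3
      refine ⟨hnd, c2, c3, c4, ?_, ?_, ?_, ?_, by omega⟩
      · -- monotone from vis
        intro x c hxc
        by_cases hx : x = a
        · subst hx; rw [hva] at hxc; cases hxc
        · obtain ⟨c', hc1, hc2⟩ := c5 x c (by rw [PySem.Dict.get?_insert_of_ne _ _ hx]; exact hxc)
          exact ⟨c', hc1, hc2⟩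
      · -- every neighbour reaches at least l+1
        intro y hy
        rcases List.mem_cons.mp hy with rfl | hyt
        · obtain ⟨c', hc1, hc2⟩ := c5 y (l + 1) (PySem.Dict.get?_insert_self _ _ _)
          exact ⟨c', hc1, by omega⟩
        · exact c6 y hyt
      · -- old queue entries persist
        intro p hp
        exact c7 p (List.mem_append_left _ hp)
      · -- new values are l+1 and enqueued
        intro x c hxc
        rcases c8 x c hxc with hmid | ⟨rfl, hmem⟩
        · by_cases hx : x = a
          · subst hx
            rw [PySem.Dict.get?_insert_self] at hmid
            obtain rfl := Option.some_inj.mp hmid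
            exact Or.inr ⟨rfl, c7 (x, l + 1) (List.mem_append_right _ (by simp))⟩
          · rw [PySem.Dict.get?_insert_of_ne _ _ hx] at hmid
            exact Or.inl hmid
        · exact Or.inr ⟨rfl, hmem⟩
    · -- already visited
      by_cases hlt : old < l + 1
      · -- strictly better: push
        rw [hpush (Or.inr ⟨old, hva, hlt⟩)]
        have hold0 : 0 ≤ old := (hv a old hva).1
        have holdNat : (vis.getD a 0).toNat = old.toNat := by
          rw [PySem.Dict.getD_eq_get?_getD, hva]; rfl
        obtain ⟨k1, k2, k3, k4⟩ := hcommon old.toNat holdNat (by omega)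
        obtain ⟨c1, c2, c3, c4, c5, c6, c7, c8, c9⟩ := ih hnt (q ++ [(a, l + 1)]) (vis.insert a (l + 1)) k1 k2 k3
        refine ⟨hnd, c2, c3, c4, ?_, ?_, ?_, ?_, by omega⟩
        · intro x c hxc
          by_cases hx : x = a
          · subst hx
            rw [hva] at hxc
            obtain rfl := Option.some_inj.mp hxc
            obtain ⟨c', hc1, hc2⟩ := c5 x (l + 1) (PySem.Dict.get?_insert_self _ _ _)
            exact ⟨c', hc1, by omega⟩
          · obtain ⟨c', hc1, hc2⟩ := c5 x c (by rw [PySem.Dict.get?_insert_of_ne _ _ hx]; exact hxc)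
            exact ⟨c', hc1, hc2⟩
        · intro y hy
          rcases List.mem_cons.mp hy with rfl | hyt
          · obtain ⟨c', hc1, hc2⟩ := c5 y (l + 1) (PySem.Dict.get?_insert_self _ _ _)
            exact ⟨c', hc1, by omega⟩
          · exact c6 y hyt
        · intro p hp
          exact c7 p (List.mem_append_left _ hp)
        · intro x c hxc
          rcases c8 x c hxc with hmid | ⟨rfl, hmem⟩
          · by_cases hx : x = a
            · subst hx
              rw [PySem.Dict.get?_insert_self] at hmid
              obtain rfl := Option.some_inj.mp hmid
              exact Or.inr ⟨rfl, c7 (x, l + 1) (List.mem_append_right _ (by simp))⟩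
            · rw [PySem.Dict.get?_insert_of_ne _ _ hx] at hmid
              exact Or.inl hmid
          · exact Or.inr ⟨rfl, hmem⟩
      · -- no improvement: skip
        rw [hskip old hva hlt]
        obtain ⟨c1, c2, c3, c4, c5, c6, c7, c8, c9⟩ := ih hnt q vis hnd hq hv
        refine ⟨hnd, c2, c3, c4, c5, ?_, c7, c8, c9⟩
        intro y hy
        rcases List.mem_cons.mp hy with rfl | hyt
        · obtain ⟨c', hc1, hc2⟩ := c5 y old hva
          exact ⟨c', hc1, by omega⟩
        · exact c6 y hyt


def pvBfsGood (E : List (Int × Int)) (u : Int) (vis r : PySem.Dict Int Int) : Prop :=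
  (∀ x c, vis.get? x = some c → ∃ c', r.get? x = some c' ∧ c ≤ c') ∧
  pvVInv E u r ∧
  (∀ x c, r.get? x = some c → ∀ y ∈ pvSucc E x, ∃ c', r.get? y = some c' ∧ c + 1 ≤ c')


lemma bfs_run {edges : List (Int × Int)} (hac : pvAcyclic edges) {u : Int}
    {graph : PySem.Dict Int (List Int)} (hg : ∀ x, graph.getD x [] = pvSucc edges x) :
    ∀ (fuel : Nat) (q : List (Int × Int)) (vis : PySem.Dict Int Int),
      vis.keys.Nodup → pvQInv edges u q → pvVInv edges u vis → pvWInv edges q vis →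
      pvM edges q vis < fuel →
      pvBfsGood edges u vis (pyA_bfs graph fuel q vis) := by
  intro fuel
  induction fuel with
  | zero => intro q vis _ _ _ _ hm; omega
  | succ fuel ih =>
    intro q vis hnd hq hv hw hm
    rcases q with _ | ⟨⟨current, l⟩, tail⟩
    · -- empty queue: done
      show pvBfsGood edges u vis vis
      refine ⟨fun x c h => ⟨c, h, Int.le_refl c⟩, hv, ?_⟩
      intro x c hxc y hy
      rcases hw x c hxc with hmem | hfix
      · simp at hmem
      · exact hfix y hy
    · -- pop (current, l)
      obtain ⟨hl, hpath⟩ := hq (current, l) List.mem_cons_self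
      have hqt : pvQInv edges u tail := fun p hp => hq p (List.mem_cons_of_mem _ hp)
      have hns : ∀ y ∈ pvSucc edges current, (current, y) ∈ edges :=
        fun y hy => (mem_pvSucc _ _ _).mp hy
      have hfold := bfs_fold hac hl hpath (pvSucc edges current) hns tail vis hnd hqt hv
      obtain ⟨c1, c2, c3, c4, c5, c6, c7, c8, c9⟩ := hfold
      set st := (pvSucc edges current).foldl (pvStepF l) (tail, vis) with hst
      have hred : pyA_bfs graph (fuel + 1) ((current, l) :: tail) vis = pyA_bfs graph fuel st.1 st.2 := by
        show (let st' := (graph.getD current []).foldl _ (tail, vis); pyA_bfs graph fuel st'.1 st'.2)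
          = pyA_bfs graph fuel st.1 st.2
        rw [hg current]
        rfl
      rw [hred]
      -- re-establish the invariants for the new state
      have hwinv : pvWInv edges st.1 st.2 := by
        intro x c hxc
        rcases c8 x c hxc with hold | ⟨rfl, hmem⟩
        · rcases hw x c hold with hmem | hfix
          · rcases List.mem_cons.mp hmem with heq | hmemt
            · obtain ⟨rfl, rfl⟩ : x = current ∧ c = l := by
                simpa [Prod.ext_iff] using heq
              refine Or.inr ?_
              intro y hy
              obtain ⟨c', hc1, hc2⟩ := c6 y hy
              exact ⟨c', hc1, by omega⟩
            · exact Or.inl (c7 _ hmemt)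
          · refine Or.inr ?_
            intro y hy
            obtain ⟨c', hc1, hc2⟩ := hfix y hy
            obtain ⟨c'', hc1', hc2'⟩ := c5 y c' hc1
            exact ⟨c'', hc1', by omega⟩
        · exact Or.inl hmem
      have hm' : pvM edges st.1 st.2 < fuel := by
        have h1 : pvM edges ((current, l) :: tail) vis
            = (pvNodes edges).length * pvSum edges vis + tail.length + 1 := by
          simp only [pvM, List.length_cons]
          exact (Nat.add_assoc _ _ _).symm
        have h2 : (pvNodes edges).length * pvSum edges vis + tail.length + 1 ≤ fuel :=
          h1 ▸ Nat.lt_succ_iff.mp hm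
        show (pvNodes edges).length * pvSum edges st.2 + st.1.length < fuel
        exact Nat.lt_of_le_of_lt c9 (Nat.lt_of_lt_of_le (Nat.lt_succ_self _) h2)
      have := ih st.1 st.2 c4 c2 c3 hwinv hm'
      obtain ⟨g1, g2, g3⟩ := this
      refine ⟨?_, g2, g3⟩
      intro x c hxc
      obtain ⟨c', hc1, hc2⟩ := c5 x c hxc
      obtain ⟨c'', hc1', hc2'⟩ := g1 x c' hc1
      exact ⟨c'', hc1', by omega⟩


lemma bfs_keys_nodup (graph : PySem.Dict Int (List Int)) :
    ∀ (fuel : Nat) (q : List (Int × Int)) (vis : PySem.Dict Int Int), vis.keys.Nodup →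
      (pyA_bfs graph fuel q vis).keys.Nodup := by
  intro fuel
  induction fuel with
  | zero => intro q vis h; exact h
  | succ fuel ih =>
    intro q vis h
    rcases q with _ | ⟨⟨current, l⟩, tail⟩
    · exact h
    · have hfold : ∀ (ns : List Int) (q' : List (Int × Int)) (vis' : PySem.Dict Int Int),
          vis'.keys.Nodup →
          (ns.foldl (fun (st : List (Int × Int) × PySem.Dict Int Int) neighbor =>
            let newLength := l + 1
            match st.2.get? neighbor with
            | none => (st.1 ++ [(neighbor, newLength)], st.2.insert neighbor newLength)
            | some old => if old < newLength then (st.1 ++ [(neighbor, newLength)], st.2.insert neighbor newLength) else st)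
            (q', vis')).2.keys.Nodup := by
        intro ns
        induction ns with
        | nil => intro q' vis' h'; exact h'
        | cons a t iht =>
          intro q' vis' h'
          rw [List.foldl_cons]
          rcases hva : vis'.get? a with _ | old
          · simp only [hva]
            exact iht _ _ (PySem.Dict.nodup_keys_insert _ _ _ h')
          · simp only [hva]
            by_cases hlt : old < l + 1
            · rw [if_pos hlt]
              exact iht _ _ (PySem.Dict.nodup_keys_insert _ _ _ h')
            · rw [if_neg hlt]
              exact iht _ _ h'
      exact ih _ _ (hfold _ _ _ h)


lemma bfs_source {edges : List (Int × Int)} (hac : pvAcyclic edges) {u : Int}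
    {graph : PySem.Dict Int (List Int)} (hg : ∀ x, graph.getD x [] = pvSucc edges x) :
    pvBfsGood edges u (PySem.Dict.empty.insert u 0)
      (pyA_bfs graph (((pvNodes edges).length + 2) ^ 3) [(u, 0)] (PySem.Dict.empty.insert u 0)) := by
  have hget : ∀ (x : Int) (c : Int), ((PySem.Dict.empty.insert u 0 : PySem.Dict Int Int)).get? x = some c → x = u ∧ c = 0 := by
    intro x c h
    by_cases hx : x = u
    · subst hx
      rw [PySem.Dict.get?_insert_self] at h
      exact ⟨rfl, (Option.some_inj.mp h).symm⟩
    · rw [PySem.Dict.get?_insert_of_ne _ _ hx, PySem.Dict.get?_empty] at h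
      cases h
  apply bfs_run hac hg
  · exact PySem.Dict.nodup_keys_insert _ _ _ PySem.Dict.nodup_keys_empty
  · intro p hp
    obtain rfl : p = (u, 0) := by simpa using hp
    exact ⟨Int.le_refl 0, PvPath.refl u⟩
  · intro x c h
    obtain ⟨rfl, rfl⟩ := hget x c h
    exact ⟨Int.le_refl 0, PvPath.refl x⟩
  · intro x c h
    obtain ⟨rfl, rfl⟩ := hget x c h
    exact Or.inl (List.mem_singleton.mpr rfl)
  · -- the fuel bound
    set V := (pvNodes edges).length with hV
    have hsum : pvSum edges (PySem.Dict.empty.insert u 0) ≤ V * V := by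
      have : ∀ t ∈ (pvNodes edges).map
          (fun x => V - (((PySem.Dict.empty.insert u 0) : PySem.Dict Int Int).getD x 0).toNat), t ≤ V := by
        intro t ht
        obtain ⟨x, _, rfl⟩ := List.mem_map.mp ht
        omega
      have := List.sum_le_card_nsmul _ V this
      simpa [pvSum, smul_eq_mul, Nat.mul_comm] using this
    have : pvM edges [(u, 0)] (PySem.Dict.empty.insert u 0) ≤ V * (V * V) + 1 := by
      simp only [pvM, List.length_cons, List.length_nil]
      nlinarith [hsum]
    have hcube : V * (V * V) + 1 < (V + 2) ^ 3 := by nlinarith [sq_nonneg V]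
    exact Nat.lt_of_le_of_lt this hcube


lemma bfs_complete {edges : List (Int × Int)} (hac : pvAcyclic edges) {u : Int}
    {r : PySem.Dict Int Int} (hgood : pvBfsGood edges u (PySem.Dict.empty.insert u 0) r) :
    ∀ (k : Nat) (x : Int), PvPath edges u x k → ∃ c, r.get? x = some c ∧ (k : Int) ≤ c := by
  obtain ⟨hmono, hvinv, hfix⟩ := hgood
  have hu : r.get? u = some 0 := by
    obtain ⟨c, hc, hc0⟩ := hmono u 0 (PySem.Dict.get?_insert_self _ _ _)
    obtain ⟨hcn, hp⟩ := hvinv u c hc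
    have : c.toNat = 0 := by
      rcases hk : c.toNat with _ | j
      · rfl
      · rw [hk] at hp
        exact absurd hp (hac u j)
    obtain rfl : c = 0 := by omega
    exact hc
  intro k
  induction k with
  | zero =>
    intro x hp
    obtain rfl := pvPath_zero hp
    exact ⟨0, hu, by omega⟩
  | succ j ih =>
    intro x hp
    obtain ⟨y, hy1, hy2⟩ := pvPath_snoc_elim hp
    obtain ⟨cy, hcy, hcyk⟩ := ih y hy1
    obtain ⟨cx, hcx, hcx2⟩ := hfix y cy hcy x ((mem_pvSucc _ _ _).mpr hy2)
    refine ⟨cx, hcx, ?_⟩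
    push_cast
    omega


-- ===== A: the max_path_lengths dictionary =====


lemma block_skip {node b : Int} :
    ∀ (ps : List (Int × Int)) (m : PySem.Dict (Int × Int) Int),
      (∀ p ∈ ps, p.1 = node ∨ p.1 ≠ b) →
      (ps.foldl (fun m p => if node ≠ p.1 then m.insert (node, p.1) p.2 else m) m).get? (node, b)
        = m.get? (node, b) := by
  intro ps
  induction ps with
  | nil => intro m _; rfl
  | cons p t ih =>
    intro m hps
    rw [List.foldl_cons]
    rcases hps p List.mem_cons_self with hp | hp
    · have hcond : ¬ (node ≠ p.1) := by simp [hp]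
      rw [if_neg hcond]
      exact ih m (fun p' hp' => hps p' (List.mem_cons_of_mem _ hp'))
    · by_cases hnp : node ≠ p.1
      · rw [if_pos hnp]
        rw [ih _ (fun p' hp' => hps p' (List.mem_cons_of_mem _ hp'))]
        apply PySem.Dict.get?_insert_of_ne
        intro hcontra
        have : b = p.1 := (Prod.ext_iff.mp hcontra).2
        exact hp this.symm
      · rw [if_neg hnp]
        exact ih m (fun p' hp' => hps p' (List.mem_cons_of_mem _ hp'))


lemma block_hit {node b c : Int} (hb : b ≠ node) :
    ∀ (ps : List (Int × Int)) (m : PySem.Dict (Int × Int) Int),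
      (b, c) ∈ ps → (ps.map Prod.fst).Nodup →
      (ps.foldl (fun m p => if node ≠ p.1 then m.insert (node, p.1) p.2 else m) m).get? (node, b)
        = some c := by
  intro ps
  induction ps with
  | nil => intro m h _; simp at h
  | cons p t ih =>
    intro m hmem hnd
    rw [List.map_cons, List.nodup_cons] at hnd
    rw [List.foldl_cons]
    rcases List.mem_cons.mp hmem with rfl | hmem'
    · -- head is (b, c)
      have hcond : node ≠ (b, c).1 := fun h => hb h.symm
      rw [if_pos hcond]
      rw [block_skip t _ ?_]
      · exact PySem.Dict.get?_insert_self _ _ _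
      · intro p' hp'
        right
        intro hcontra
        exact hnd.1 (hcontra ▸ List.mem_map.mpr ⟨p', hp', rfl⟩)
    · -- (b, c) is further on; the head step cannot touch (node, b)
      have hpb : p.1 ≠ b := fun h =>
        hnd.1 (h ▸ List.mem_map.mpr ⟨(b, c), hmem', rfl⟩)
      by_cases hnp : node ≠ p.1
      · rw [if_pos hnp]
        exact ih _ hmem' hnd.2
      · rw [if_neg hnp]
        exact ih _ hmem' hnd.2


lemma outer_skip {u v : Int} (visOf : Int → PySem.Dict Int Int) :
    ∀ (L : List Int) (m : PySem.Dict (Int × Int) Int), u ∉ L →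
      (L.foldl (fun m node => (visOf node).items.foldl
        (fun m p => if node ≠ p.1 then m.insert (node, p.1) p.2 else m) m) m).get? (u, v)
        = m.get? (u, v) := by
  intro L
  induction L with
  | nil => intro m _; rfl
  | cons n t ih =>
    intro m hu
    rw [List.foldl_cons]
    have hnu : n ≠ u := fun h => hu (h ▸ List.mem_cons_self)
    rw [ih _ (fun h => hu (List.mem_cons_of_mem _ h))]
    -- one block for node n ≠ u never writes a key (u, _)
    generalize (visOf n).items = ps
    induction ps generalizing m with
    | nil => rfl
    | cons p t' ih' =>
      rw [List.foldl_cons]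
      by_cases hnp : n ≠ p.1
      · rw [if_pos hnp, ih']
        apply PySem.Dict.get?_insert_of_ne
        intro hcontra
        exact hnu ((Prod.ext_iff.mp hcontra).1.symm)
      · rw [if_neg hnp, ih']


lemma mpl_get (visOf : Int → PySem.Dict Int Int) {u v c : Int} (hvne : v ≠ u)
    (hkeys : (visOf u).keys.Nodup) (hval : (visOf u).get? v = some c) :
    ∀ (L : List Int) (m : PySem.Dict (Int × Int) Int), u ∈ L → L.Nodup →
      (L.foldl (fun m node => (visOf node).items.foldl
        (fun m p => if node ≠ p.1 then m.insert (node, p.1) p.2 else m) m) m).get? (u, v)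
        = some c := by
  intro L
  induction L with
  | nil => intro m h _; simp at h
  | cons n t ih =>
    intro m hu hnd
    rw [List.foldl_cons]
    rcases List.mem_cons.mp hu with rfl | hut
    · -- u's own block, then blocks of other nodes only
      rw [outer_skip visOf t _ (List.nodup_cons.mp hnd).1]
      have hitems : (v, c) ∈ (visOf u).items := PySem.Dict.mem_items_of_get?_eq_some _ hval
      exact block_hit hvne _ _ hitems (by
        have h : (visOf u).items.map Prod.fst = (visOf u).keys := rfl
        rw [h]; exact hkeys)
    · exact ih _ hut (List.nodup_cons.mp hnd).2


theorem final_assembly (edges : List (Int × Int))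
    (hpre : Pre_filter_edges_by_longest_paths_py edges) :
    filter_edges_by_longest_paths_py edges = filter_edges_by_longest_paths_py_alt edges := by
  have hac : pvAcyclic edges := (pre_iff_acyclic edges).mp hpre
  simp only [filter_edges_by_longest_paths_py, filter_edges_by_longest_paths_py_alt]
  rw [PySem.List.foldl_prod_mk
    (f := fun (d : PySem.Dict Int (List Int)) (e : Int × Int) => d.modify e.1 [] (· ++ [e.2]))
    (g := fun (s : PySem.Set Int) (e : Int × Int) => PySem.Set.add (PySem.Set.add s e.1) e.2)]
  set GRAPH := edges.foldl (fun (d : PySem.Dict Int (List Int)) (e : Int × Int) =>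
      d.modify e.1 [] (· ++ [e.2])) PySem.Dict.empty with hG
  have hnodes : edges.foldl (fun (s : PySem.Set Int) (e : Int × Int) =>
      PySem.Set.add (PySem.Set.add s e.1) e.2) PySem.Set.empty = pvNodes edges := rfl
  rw [hnodes]
  have hgetd : ∀ x, GRAPH.getD x [] = pvSucc edges x := fun x => graphA_getD edges x
  have hlen : (PySem.List.sorted (pvNodes edges) (fun x => x) false).length = (pvNodes edges).length :=
    PySem.List.length_sorted _ _ _
  rw [hlen]
  apply PySem.List.foldl_congr_mem
  intro acc e he
  obtain ⟨u, v⟩ := e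
  -- basic facts about the edge
  have hun : u ∈ pvNodes edges := mem_pvNodes.mpr ⟨(u, v), he, Or.inl rfl⟩
  have huv : u ≠ v := by
    rintro rfl
    exact hac u 0 (PvPath.cons he (PvPath.refl u))
  -- the BFS result from u
  have hgood := bfs_source (u := u) hac hgetd
  obtain ⟨c, hc, hc1⟩ := bfs_complete hac hgood 1 v (PvPath.cons he (PvPath.refl v))
  have hc1' : (1 : Int) ≤ c := by exact_mod_cast hc1
  have hkeysU : (pyA_bfs GRAPH (((pvNodes edges).length + 2) ^ 3) [(u, 0)]
      (PySem.Dict.empty.insert u 0)).keys.Nodup :=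
    bfs_keys_nodup GRAPH _ _ _ (PySem.Dict.nodup_keys_insert _ _ _ PySem.Dict.nodup_keys_empty)
  -- the A side looks the edge up in max_path_lengths
  have hmpl := mpl_get (fun node => pyA_bfs GRAPH (((pvNodes edges).length + 2) ^ 3) [(node, 0)]
      (PySem.Dict.empty.insert node 0)) (fun h => huv h.symm) hkeysU hc
    (PySem.List.sorted (pvNodes edges) (fun x => x) false) PySem.Dict.empty
    ((PySem.List.mem_sorted _ _ _ _).mpr hun)
    ((PySem.List.sorted_perm _ _ _).nodup_iff.mpr (nodup_pvNodes edges))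
  rw [hmpl]
  -- the B side tests for a path of length ≥ 2
  have hfull := reachB_full (edges := edges) hac
  have hiff : ((pyB_succ edges).getD u []).all (fun w => w == v ||
      !(PySem.Set.contains ((pyB_reach (pyB_succ edges)).getD w PySem.Set.empty) v)) = true
      ↔ c ≤ 1 := by
    rw [succB_getD, List.all_eq_true]
    constructor
    · intro hall
      by_contra hgt
      have hgt' : 1 < c := by omega
      obtain ⟨h0c, hpc⟩ := hgood.2.1 v c hc
      have htn : ∃ j, c.toNat = j + 2 := ⟨c.toNat - 2, by omega⟩
      obtain ⟨j, hj⟩ := htn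
      rw [hj] at hpc
      obtain ⟨w, hw, hpw⟩ := pvPath_succ_iff.mp hpc
      have hwv : w ≠ v := by
        rintro rfl
        exact hac w j hpw
      have hwn : w ∈ pvNodes edges := mem_pvNodes.mpr ⟨(u, w), hw, Or.inr rfl⟩
      obtain ⟨Sw, hSw, hSw2⟩ := hfull w hwn
      have := hall w ((mem_pvSucc _ _ _).mpr hw)
      rw [Bool.or_eq_true, beq_iff_eq, Bool.not_eq_true'] at this
      rcases this with h | h
      · exact hwv h
      · rw [PySem.Dict.getD_of_get?_eq_some _ _ hSw] at h
        have hvin : v ∈ Sw := (hSw2 v).mpr ⟨j + 1, hpw⟩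
        have := (PySem.Set.contains_iff Sw v).mpr hvin
        rw [this] at h
        cases h
    · intro hle w hw
      rw [mem_pvSucc] at hw
      rw [Bool.or_eq_true, beq_iff_eq, Bool.not_eq_true']
      by_cases hwv : w = v
      · exact Or.inl hwv
      · refine Or.inr ?_
        have hwn : w ∈ pvNodes edges := mem_pvNodes.mpr ⟨(u, w), hw, Or.inr rfl⟩
        obtain ⟨Sw, hSw, hSw2⟩ := hfull w hwn
        rw [PySem.Dict.getD_of_get?_eq_some _ _ hSw]
        rcases hcon : PySem.Set.contains Sw v with _ | _
        · rfl
        · exfalso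
          have hvin : v ∈ Sw := (PySem.Set.contains_iff Sw v).mp hcon
          obtain ⟨k, hpk⟩ := (hSw2 v).mp hvin
          have hk1 : 1 ≤ k := by
            rcases Nat.eq_zero_or_pos k with rfl | h
            · exact absurd (pvPath_zero hpk) hwv
            · exact h
          obtain ⟨c', hc', hc'2⟩ := bfs_complete hac hgood (k + 1) v (PvPath.cons hw hpk)
          rw [hc] at hc'
          obtain rfl := Option.some_inj.mp hc'
          have : ((k : Int) + 1) ≤ c := by exact_mod_cast hc'2
          omega
  show (if c > 1 then acc else PySem.Set.add acc (u, v)) =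
    (if (((pyB_succ edges).getD u []).all fun w => w == v ||
        !((pyB_reach (pyB_succ edges)).getD w PySem.Set.empty).contains v) = true
      then PySem.Set.add acc (u, v) else acc)
  by_cases hgt : c > 1
  · rw [if_pos hgt]
    have : ¬ (((pyB_succ edges).getD u []).all (fun w => w == v ||
        !(PySem.Set.contains ((pyB_reach (pyB_succ edges)).getD w PySem.Set.empty) v)) = true) := by
      rw [hiff]; omega
    rw [if_neg this]
  · rw [if_neg hgt]
    rw [if_pos (hiff.mpr (by omega))]


-- ===== VERDICT (by name: the statement is the Claim_ definition above) =====
theorem filter_edges_by_longest_paths_py_spec : Claim_equal_filter_edges_by_longest_paths_py := by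
  intro edges _ hpre
  exact final_assembly edges hpre
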